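-- pv_equiv track=rewrite | github.com/kI0ums/ASD | lab3/lab3.py | dynamic_array2
-- ===== SOURCE A (Python) =====
-- def dynamic_array2(array):
--     modified_text = ""
--     start_word = 0
--     array.append(' ')
--     last_letter = ''
--     for i in range(len(array)):
--         if array[i] == ' ' and i != start_word:
--             if (i - start_word) % 2 == 0:
--                 for letter in array[start_word:i]:
--                     if letter != 'o':
--                         modified_text += letter
--                         last_letter = letter
--                 modified_text += last_letter + ' '
--         if array[i] == ' ':
--             start_word = i + 1
--     return modified_text.rstrip()
-- ===== SOURCE B (Python) =====
-- # B: recursive divide-and-conquer on the first ' ' delimiter (index + slice),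
-- # last kept element via kept[-1] instead of a per-character state update;
-- # mutates the argument like A (append ' ').
-- def dynamic_array2(array):
--     array.append(' ')
--
--     def rec(rest, last):
--         if not rest:
--             return ''
--         cut = rest.index(' ')      # always present: rest ends with ' '
--         word, rest2 = rest[:cut], rest[cut + 1:]
--         if word and len(word) % 2 == 0:
--             kept = [x for x in word if x != 'o']
--             if kept:
--                 last = kept[-1]
--             return ''.join(kept) + last + ' ' + rec(rest2, last)
--         return rec(rest2, last)
--
--     return rec(array, '').rstrip()
-- ===== Notes on version B (the rewrite author's own statement) =====
-- stated objective: alternative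
-- what changed: B is recursive divide-and-conquer: it locates the next delimiter with .index(' '), slices the word off, computes the kept elements by one filter and the carried letter as kept[-1], and recurses on the remainder, instead of A's flat index loop with stateful start_word/last_letter bookkeeping and per-character last-letter updates; both mutate the argument identically (append ' ').
import Mathlib
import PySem

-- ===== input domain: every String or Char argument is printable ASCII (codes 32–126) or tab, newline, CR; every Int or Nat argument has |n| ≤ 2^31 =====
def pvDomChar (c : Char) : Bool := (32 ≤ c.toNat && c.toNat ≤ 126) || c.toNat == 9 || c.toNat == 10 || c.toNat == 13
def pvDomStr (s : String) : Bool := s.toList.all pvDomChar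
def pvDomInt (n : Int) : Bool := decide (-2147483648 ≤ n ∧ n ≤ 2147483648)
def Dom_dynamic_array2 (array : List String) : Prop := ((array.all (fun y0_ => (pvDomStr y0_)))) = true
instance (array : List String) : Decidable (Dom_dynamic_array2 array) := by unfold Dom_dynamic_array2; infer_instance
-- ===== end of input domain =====

-- B replaces A's flat index scan (stateful start_word / per-character last_letter) by a
-- recursive divide on the first ' ' delimiter; equivalence is about the RETURN value —
-- both Pythons mutate the argument identically (append ' ').

-- ===== PORT A =====
-- A-side helpers: the inner 'for letter in array[start_word:i]' loop, and the body of A's index loop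
def pvInner (cur : List String) (st : List Char × List Char) : List Char × List Char :=
  cur.foldl (fun p letter => if letter ≠ "o" then (p.1 ++ letter.toList, letter.toList) else p) st

def pvAStep (arr : List String) (st : List Char × Int × List Char) (i : Int) :
    List Char × Int × List Char :=
  let st1 :=
    if PySem.List.pyGetD arr i "" = " " ∧ i ≠ st.2.1 then
      if PySem.Int.mod (i - st.2.1) 2 = 0 then
        let q := pvInner (PySem.List.slice arr (some st.2.1) (some i)) (st.1, st.2.2)
        (q.1 ++ q.2 ++ [' '], st.2.1, q.2)
      else st
    else st
  if PySem.List.pyGetD arr i "" = " " then (st1.1, i + 1, st1.2.2) else st1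

def dynamic_array2 (array : List String) : String :=
  let arr := array ++ [" "]
  let fin := (PySem.List.pyRange 0 (arr.length : Int) 1).foldl (pvAStep arr)
    (([] : List Char), (0 : Int), ([] : List Char))
  String.ofList (PySem.Chars.rstrip fin.1)

-- ===== PORT B =====
-- B-side helpers: 'if kept: last = kept[-1]' as a function, and the termination fact for rec
def pvLastOr (kept : List String) (last : List Char) : List Char :=
  match kept.getLast? with | some k => k.toList | none => last

theorem pvRest2_lt {rest : List String} {cut : Nat}
    (h : PySem.List.index? rest " " = some cut) :
    (PySem.List.slice rest (some ((cut : Int) + 1)) none).length < rest.length := by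
  obtain ⟨hk, -, -⟩ := PySem.List.getElem_of_index?_eq_some h
  have h1 : ((cut : Int) + 1) = ((cut + 1 : Nat) : Int) := by push_cast; ring
  rw [h1, PySem.List.slice_from_natCast, List.length_drop]
  omega

-- the recursive helper 'rec(rest, last)'; Python raises ValueError on a nonempty rest
-- without ' ', which is unreachable from the top-level call (every rest ends with ' ');
-- 'none' covers both that dead branch and Python's 'if not rest: return '''
def pvRec (rest : List String) (last : List Char) : List Char :=
  match h : PySem.List.index? rest " " with
  | none => []
  | some cut =>
    let word := PySem.List.slice rest none (some (cut : Int))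
    let rest2 := PySem.List.slice rest (some ((cut : Int) + 1)) none
    if word ≠ [] ∧ word.length % 2 = 0 then
      let kept := word.filter (fun x => x ≠ "o")
      let last' := pvLastOr kept last
      (kept.map String.toList).flatten ++ last' ++ [' '] ++ pvRec rest2 last'
    else pvRec rest2 last
  termination_by rest.length
  decreasing_by all_goals exact pvRest2_lt h

def dynamic_array2_alt (array : List String) : String :=
  let arr := array ++ [" "]
  String.ofList (PySem.Chars.rstrip (pvRec arr []))

-- ===== PRECONDITION & SPEC =====
def Spec_dynamic_array2 (array : List String) (out : String) : Prop := out = dynamic_array2_alt array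
instance (array : List String) (out : String) : Decidable (Spec_dynamic_array2 array out) := by unfold Spec_dynamic_array2; infer_instance

-- ===== CLAIM (what is proved, stated in full; the proofs are below) =====
def Claim_equal_dynamic_array2 : Prop := ∀ (array : List String), Dom_dynamic_array2 array → Spec_dynamic_array2 array (dynamic_array2 array)

-- ===== LEMMAS AND PROOFS =====

-- the word-by-word process A's index loop amounts to, text-level state (text, last_letter)
def pvGo : List String → List String → List Char × List Char → List Char × List Char
  | [], _, st => st
  | x :: xs, cur, st =>
    if x = " " then
      if cur ≠ [] ∧ cur.length % 2 = 0 then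
        let q := pvInner cur st
        pvGo xs [] (q.1 ++ q.2 ++ [' '], q.2)
      else pvGo xs [] st
    else pvGo xs (cur ++ [x]) st

theorem pvGetD_append_length (l r : List String) (x d : String) :
    (l ++ x :: r).getD l.length d = x := by
  simp [List.getD_eq_getElem?_getD]

-- A's index loop over the remaining suffix equals the word-by-word process
theorem pvALoop (rest : List String) : ∀ (pre0 cur : List String) (text last : List Char),
    ((PySem.List.pyRange ((pre0.length + cur.length : Nat) : Int)
        ((pre0.length + cur.length + rest.length : Nat) : Int) 1).foldl
      (pvAStep (pre0 ++ cur ++ rest)) (text, ((pre0.length : Nat) : Int), last)).1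
      = (pvGo rest cur (text, last)).1
  ∧ ((PySem.List.pyRange ((pre0.length + cur.length : Nat) : Int)
        ((pre0.length + cur.length + rest.length : Nat) : Int) 1).foldl
      (pvAStep (pre0 ++ cur ++ rest)) (text, ((pre0.length : Nat) : Int), last)).2.2
      = (pvGo rest cur (text, last)).2 := by
  induction rest with
  | nil =>
    intro pre0 cur text last
    simp only [List.length_nil, Nat.add_zero, List.append_nil]
    rw [PySem.List.pyRange_one_eq_nil (le_refl _)]
    exact ⟨rfl, rfl⟩
  | cons x rest ih =>
    intro pre0 cur text last
    have hlt : ((pre0.length + cur.length : Nat) : Int)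
        < ((pre0.length + cur.length + (x :: rest).length : Nat) : Int) := by
      push_cast [List.length_cons]; omega
    rw [PySem.List.pyRange_one_cons hlt, List.foldl_cons]
    have hget : PySem.List.pyGetD (pre0 ++ cur ++ x :: rest)
        ((pre0.length + cur.length : Nat) : Int) "" = x := by
      rw [PySem.List.pyGetD_natCast]
      simp [List.length_append, pvGetD_append_length (pre0 ++ cur) rest x ""]
    have hb1 : ((pre0.length + cur.length : Nat) : Int) + 1
        = ((pre0.length + cur.length + 1 : Nat) : Int) := by push_cast; ring
    by_cases hx : x = " "
    · by_cases hc : cur = []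
      · subst hc; subst hx
        simp only [List.length_nil, Nat.add_zero, List.append_nil] at hget ⊢
        have hstep : pvAStep (pre0 ++ " " :: rest)
            (text, ((pre0.length : Nat) : Int), (last : List Char))
            ((pre0.length : Nat) : Int)
            = (text, ((pre0.length : Nat) : Int) + 1, last) := by
          simp only [pvAStep, hget, ne_eq, not_true_eq_false, and_false, ite_false, reduceIte]
        rw [hstep]
        have harr : pre0 ++ " " :: rest = (pre0 ++ [" "]) ++ ([] : List String) ++ rest := by simp
        rw [harr]
        have := ih (pre0 ++ [" "]) [] text last
        simp only [List.length_append, List.length_cons, List.length_nil, List.append_nil,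
          Nat.add_zero] at this ⊢
        simp only [pvGo, ite_true, ne_eq, not_true_eq_false, false_and, ite_false]
        convert this using 4 <;> push_cast <;> ring_nf
      · subst hx
        have hc' : cur.length ≠ 0 := by simpa using hc
        have hne : ((pre0.length + cur.length : Nat) : Int) ≠ ((pre0.length : Nat) : Int) := by
          push_cast; omega
        have hslice : PySem.List.slice (pre0 ++ cur ++ " " :: rest)
            (some ((pre0.length : Nat) : Int)) (some ((pre0.length + cur.length : Nat) : Int))
            = cur := by
          rw [PySem.List.slice_natCast, List.append_assoc, List.drop_left,
            Nat.add_sub_cancel_left, List.take_left]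
        have hmod : PySem.Int.mod (((pre0.length + cur.length : Nat) : Int)
            - ((pre0.length : Nat) : Int)) 2 = ((cur.length % 2 : Nat) : Int) := by
          have hd : ((pre0.length + cur.length : Nat) : Int) - ((pre0.length : Nat) : Int)
              = ((cur.length : Nat) : Int) := by push_cast; ring
          rw [hd]; exact_mod_cast PySem.Int.mod_natCast cur.length 2
        by_cases hpar : cur.length % 2 = 0
        · have hstep : pvAStep (pre0 ++ cur ++ " " :: rest)
              (text, ((pre0.length : Nat) : Int), (last : List Char))
              ((pre0.length + cur.length : Nat) : Int)
              = ((pvInner cur (text, last)).1 ++ (pvInner cur (text, last)).2 ++ [' '],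
                 ((pre0.length + cur.length : Nat) : Int) + 1, (pvInner cur (text, last)).2) := by
            simp only [pvAStep, hget, hslice, hmod, ne_eq, hne, eq_self_iff_true, not_false_iff,
              and_true, true_and, and_self, if_true, if_false, ite_true, ite_false,
              Nat.cast_eq_zero, hpar, not_true_eq_false, not_false_eq_true, reduceIte]
          rw [hstep]
          have harr : pre0 ++ cur ++ " " :: rest
              = (pre0 ++ cur ++ [" "]) ++ ([] : List String) ++ rest := by simp
          rw [harr]
          have := ih (pre0 ++ cur ++ [" "]) []
            ((pvInner cur (text, last)).1 ++ (pvInner cur (text, last)).2 ++ [' '])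
            (pvInner cur (text, last)).2
          simp only [List.length_append, List.length_cons, List.length_nil, List.append_nil,
            Nat.add_zero] at this ⊢
          simp only [pvGo, hc, hpar, ne_eq, not_false_eq_true, and_self, ite_true, reduceIte]
          convert this using 4 <;> push_cast <;> ring_nf
        · have hstep : pvAStep (pre0 ++ cur ++ " " :: rest)
              (text, ((pre0.length : Nat) : Int), (last : List Char))
              ((pre0.length + cur.length : Nat) : Int)
              = (text, ((pre0.length + cur.length : Nat) : Int) + 1, last) := by
            simp only [pvAStep, hget, hslice, hmod, ne_eq, hne, eq_self_iff_true, not_false_iff,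
              and_true, true_and, and_self, if_true, if_false, ite_true, ite_false,
              Nat.cast_eq_zero, hpar, not_true_eq_false, not_false_eq_true, reduceIte]
          rw [hstep]
          have harr : pre0 ++ cur ++ " " :: rest
              = (pre0 ++ cur ++ [" "]) ++ ([] : List String) ++ rest := by simp
          rw [harr]
          have := ih (pre0 ++ cur ++ [" "]) [] text last
          simp only [List.length_append, List.length_cons, List.length_nil, List.append_nil,
            Nat.add_zero] at this ⊢
          simp only [pvGo, hc, hpar, ne_eq, not_false_eq_true, and_false, ite_false, reduceIte]
          convert this using 4 <;> push_cast <;> ring_nf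
    · -- x ≠ " "
      have hstep : pvAStep (pre0 ++ cur ++ x :: rest)
          (text, ((pre0.length : Nat) : Int), (last : List Char))
          ((pre0.length + cur.length : Nat) : Int)
          = (text, ((pre0.length : Nat) : Int), last) := by
        simp only [pvAStep, hget, hx, false_and, if_false]
      rw [hstep]
      have harr : pre0 ++ cur ++ x :: rest = pre0 ++ (cur ++ [x]) ++ rest := by simp
      rw [harr, hb1]
      have := ih pre0 (cur ++ [x]) text last
      simp only [List.length_append, List.length_cons, List.length_nil] at this ⊢
      simp only [pvGo, if_neg hx]
      convert this using 4 <;> push_cast <;> ring_nf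

-- pvLastOr steps through a cons
theorem pvLastOr_cons (k : String) (ks : List String) (l : List Char) :
    pvLastOr (k :: ks) l = pvLastOr ks k.toList := by
  cases ks with
  | nil => simp [pvLastOr]
  | cons b t =>
    obtain ⟨a, ha⟩ : ∃ a, (b :: t).getLast? = some a := by
      cases h : (b :: t).getLast? with
      | some a => exact ⟨a, rfl⟩
      | none => exact absurd h (by simp)
    simp [pvLastOr, List.getLast?_cons_cons, ha]

-- A's inner letter loop = filter + flatten + last-or-carry
theorem pvInner_eq (w : List String) : ∀ (t l : List Char),
    pvInner w (t, l) = (t ++ ((w.filter (fun x => x ≠ "o")).map String.toList).flatten,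
      pvLastOr (w.filter (fun x => x ≠ "o")) l) := by
  induction w with
  | nil => intro t l; simp [pvInner, pvLastOr]
  | cons ch w ih =>
    intro t l
    by_cases hc : ch = "o"
    · simp only [pvInner, List.foldl_cons, hc, ne_eq, not_true_eq_false, ite_false]
      simpa [pvInner, hc] using ih t l
    · have h1 : pvInner (ch :: w) (t, l) = pvInner w (t ++ ch.toList, ch.toList) := by
        simp [pvInner, hc]
      rw [h1, ih (t ++ ch.toList) ch.toList]
      simp [hc, pvLastOr_cons]

-- pvGo ignores a suffix with no spaces
theorem pvGo_no_space (rest : List String) (h : " " ∉ rest) :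
    ∀ (cur : List String) (st : List Char × List Char), pvGo rest cur st = st := by
  induction rest with
  | nil => intro cur st; rfl
  | cons x xs ih =>
    intro cur st
    have hx : x ≠ " " := fun he => h (by simp [he])
    simp only [pvGo, if_neg hx]
    exact ih (fun hm => h (List.mem_cons_of_mem _ hm)) (cur ++ [x]) st

-- pvGo steps over one whole word ending at a space
theorem pvGo_word (w : List String) : ∀ (cur tail : List String) (st : List Char × List Char),
    " " ∉ w →
    pvGo (w ++ " " :: tail) cur st
      = pvGo tail []
          (if cur ++ w ≠ [] ∧ (cur ++ w).length % 2 = 0 then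
             ((pvInner (cur ++ w) st).1 ++ (pvInner (cur ++ w) st).2 ++ [' '],
              (pvInner (cur ++ w) st).2)
           else st) := by
  induction w with
  | nil =>
    intro cur tail st _
    simp only [List.nil_append, List.append_nil, pvGo, ite_true, reduceIte]
    split_ifs with h <;> rfl
  | cons x w ih =>
    intro cur tail st hw
    have hx : x ≠ " " := fun he => hw (by simp [he])
    have hw' : " " ∉ w := fun hm => hw (List.mem_cons_of_mem _ hm)
    simp only [List.cons_append, pvGo, if_neg hx]
    rw [ih (cur ++ [x]) tail st hw']
    simp

-- the main bridge: pvGo = prefix ++ pvRec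
theorem pvMain : ∀ (n : Nat) (rest : List String), rest.length ≤ n →
    ∀ (cur : List String), " " ∉ cur → ∀ (t l : List Char),
    (pvGo rest cur (t, l)).1 = t ++ pvRec (cur ++ rest) l := by
  intro n
  induction n with
  | zero =>
    intro rest hlen cur hcur t l
    have : rest = [] := List.eq_nil_of_length_eq_zero (Nat.le_zero.mp hlen)
    subst this
    have hidx : PySem.List.index? (cur ++ []) " " = none :=
      (PySem.List.index?_eq_none_iff _ _).mpr (by simpa using hcur)
    rw [pvRec, hidx]
    simp [pvGo]
  | succ n ih =>
    intro rest hlen cur hcur t l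
    by_cases hs : " " ∈ rest
    · -- split rest at the first space
      obtain ⟨cut, hcut⟩ := Option.isSome_iff_exists.mp ((PySem.List.index?_isSome_iff _ _).mpr hs)
      obtain ⟨w, tail, hsplit, hwlen, hwno⟩ := (PySem.List.index?_eq_some_iff _ _ _).mp hcut
      subst hsplit
      have hcw : " " ∉ cur ++ w := by
        intro hm; rcases List.mem_append.mp hm with h | h
        · exact hcur h
        · exact hwno h
      have hidx : PySem.List.index? (cur ++ (w ++ " " :: tail)) " " = some (cur ++ w).length := by
        apply (PySem.List.index?_eq_some_iff _ _ _).mpr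
        exact ⟨cur ++ w, tail, by simp, rfl, hcw⟩
      have hword : PySem.List.slice (cur ++ (w ++ " " :: tail)) none
          (some (((cur ++ w).length : Nat) : Int)) = cur ++ w := by
        rw [PySem.List.slice_to_natCast]
        have : cur ++ (w ++ " " :: tail) = (cur ++ w) ++ " " :: tail := by simp
        rw [this, List.take_left]
      have hrest2 : PySem.List.slice (cur ++ (w ++ " " :: tail))
          (some ((((cur ++ w).length : Nat) : Int) + 1)) none = tail := by
        have h1 : ((((cur ++ w).length : Nat) : Int) + 1)
            = (((cur ++ w).length + 1 : Nat) : Int) := by push_cast; ring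
        rw [h1, PySem.List.slice_from_natCast]
        have : cur ++ (w ++ " " :: tail) = ((cur ++ w) ++ [" "]) ++ tail := by simp
        rw [this]
        have h2 : (cur ++ w).length + 1 = ((cur ++ w) ++ [" "]).length := by
          simp [List.length_append]
          omega
        rw [h2, List.drop_left]
      have htail : tail.length ≤ n := by
        have := hlen; simp [List.length_append, List.length_cons] at this; omega
      rw [pvGo_word w cur tail (t, l) hwno, pvRec, hidx]
      simp only [hword, hrest2]
      by_cases hq : cur ++ w ≠ [] ∧ (cur ++ w).length % 2 = 0
      · rw [if_pos hq, if_pos hq, pvInner_eq]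
        rw [ih tail htail [] (by simp) _ _]
        simp
      · rw [if_neg hq, if_neg hq]
        rw [ih tail htail [] (by simp) t l]
        simp
    · -- no space left: both sides are the prefix
      have hidx : PySem.List.index? (cur ++ rest) " " = none :=
        (PySem.List.index?_eq_none_iff _ _).mpr (by
          intro hm; rcases List.mem_append.mp hm with h | h
          · exact hcur h
          · exact hs h)
      rw [pvGo_no_space rest hs cur (t, l), pvRec, hidx]
      simp

-- ===== VERDICT (by name: the statement is the Claim_ definition above) =====
theorem dynamic_array2_spec : Claim_equal_dynamic_array2 := by
  intro array _dom
  unfold Spec_dynamic_array2 dynamic_array2 dynamic_array2_alt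
  have hA := (pvALoop (array ++ [" "]) [] [] [] []).1
  simp only [List.length_nil, List.length_append, List.nil_append, List.append_nil,
    Nat.zero_add, Nat.add_zero, Nat.cast_zero] at hA ⊢
  rw [hA]
  have hB := pvMain (array ++ [" "]).length (array ++ [" "]) (le_refl _) [] (by simp) [] []
  simp only [List.nil_append] at hB
  rw [hB]
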